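-- pv_equiv track=rewrite | github.com/ivanromanv/manuales | Python/Edx_Course/Python Beginners/Excercises/W6_Strings_E5_conteo_palabras_inicio_caracter_n.py | funcion_conteo_caracter_n
-- ===== SOURCE A (Python) =====
-- def funcion_conteo_caracter_n(input_string, n):
--     n = n.lower()
--     input_string = input_string.lower()
--     input_string = input_string.split()
--     contador=0
--     for x in input_string:
--         if x[0]==n:
--             contador = contador + 1
--     return contador
-- ===== SOURCE B (Python) =====
-- def funcion_conteo_caracter_n(input_string, n):
--     n = n.lower()
--     if len(n) != 1:
--         return 0
--     count = 0
--     prev_space = True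
--     for ch in input_string.lower():
--         if prev_space and (not ch.isspace()) and ch == n:
--             count += 1
--         prev_space = ch.isspace()
--     return count
-- ===== Notes on version B (the rewrite author's own statement) =====
-- stated objective: alternative
-- what changed: B never splits the string: it scans the characters once, detecting word starts (a non-space character preceded by start-of-string or a space) and counting those equal to the lowercased n, with an early 0 when len(n) != 1 since a word's first character can only equal a one-character n.
import Mathlib
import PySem

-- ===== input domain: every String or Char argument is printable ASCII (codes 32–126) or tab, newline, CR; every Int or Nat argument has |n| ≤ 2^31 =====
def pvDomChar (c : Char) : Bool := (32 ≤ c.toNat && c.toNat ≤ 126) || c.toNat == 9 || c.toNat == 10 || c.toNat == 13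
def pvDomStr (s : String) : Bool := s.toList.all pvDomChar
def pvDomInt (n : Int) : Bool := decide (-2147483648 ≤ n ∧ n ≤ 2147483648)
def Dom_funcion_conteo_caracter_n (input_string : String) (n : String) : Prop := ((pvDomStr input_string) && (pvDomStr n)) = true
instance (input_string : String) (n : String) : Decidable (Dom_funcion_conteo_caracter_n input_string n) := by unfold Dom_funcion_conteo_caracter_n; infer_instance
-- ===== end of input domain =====

-- B replaces A's split-then-tally by a single character scan that detects word
-- starts (non-space char preceded by start or space) and counts matches, never
-- building the word list (objective: alternative).


-- ===== PORT A =====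
-- Python's x[0] is a one-character string; PySem.Str.pyGet? yields the Char, so the
-- port rebuilds the one-character string before the == with n (exact on Dom).
def funcion_conteo_caracter_n (input_string : String) (n : String) : Int :=
  let n' := PySem.Str.lower n
  let ws := PySem.Str.split₀ (PySem.Str.lower input_string)
  ws.foldl (fun contador x =>
    if ((PySem.Str.pyGet? x 0).map fun c => String.ofList [c]) == some n' then contador + 1
    else contador) 0

-- ===== PORT B =====
-- Source B's loop-body test 'prev_space and (not ch.isspace()) and ch == n', on the
-- Char ch ('for ch in s' yields one-character strings, hence String.ofList [ch]).
def pvQ (n' : String) (c : Char) : Bool := !PySem.Chars.isspace c && (String.ofList [c] == n')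

-- the loop state is (count, prev_space)
def funcion_conteo_caracter_n_alt (input_string : String) (n : String) : Int :=
  let n' := PySem.Str.lower n
  if PySem.Str.len n' ≠ 1 then 0
  else
    ((PySem.Str.lower input_string).toList.foldl
      (fun (st : Int × Bool) ch =>
        ((if st.2 && pvQ n' ch then st.1 + 1 else st.1), PySem.Chars.isspace ch))
      (0, true)).1

-- ===== PRECONDITION & SPEC =====
def Spec_funcion_conteo_caracter_n (input_string : String) (n : String) (out : Int) : Prop := out = funcion_conteo_caracter_n_alt input_string n
instance (input_string : String) (n : String) (out : Int) : Decidable (Spec_funcion_conteo_caracter_n input_string n out) := by unfold Spec_funcion_conteo_caracter_n; infer_instance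

-- ===== CLAIM (what is proved, stated in full; the proofs are below) =====
def Claim_equal_funcion_conteo_caracter_n : Prop := ∀ (input_string : String) (n : String), Dom_funcion_conteo_caracter_n input_string n → Spec_funcion_conteo_caracter_n input_string n (funcion_conteo_caracter_n input_string n)

-- ===== LEMMAS AND PROOFS =====

-- "the word starts with a matching character", on the char-list form of a word
def pvP (n' : String) (w : List Char) : Bool :=
  match w.head? with
  | some c => pvQ n' c
  | none => false

-- B's scan as structural recursion (prev = prev_space)
def pvScan (n' : String) : List Char → Bool → Int
  | [], _ => 0
  | c :: cs, prev => (if prev && pvQ n' c then 1 else 0) + pvScan n' cs (PySem.Chars.isspace c)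

theorem pvScan_foldl (n' : String) (cs : List Char) : ∀ (a : Int) (prev : Bool),
    (cs.foldl (fun (st : Int × Bool) ch =>
      ((if st.2 && pvQ n' ch then st.1 + 1 else st.1), PySem.Chars.isspace ch)) (a, prev)).1
      = a + pvScan n' cs prev := by
  induction cs with
  | nil => intro a prev; simp [pvScan]
  | cons c cs ih =>
    intro a prev
    simp only [List.foldl_cons, pvScan]
    rw [ih]
    by_cases h : (prev && pvQ n' c) = true
    · simp [h]; ring
    · simp [h]

-- the core correspondence: counting the matching words that split₀.go produces
-- equals B's boundary scan; cur is the (reversed) currently open word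
theorem go_countP (n' : String) (cs : List Char) : ∀ (cur : List Char) (acc : List (List Char)),
    ((PySem.Chars.split₀.go cs cur acc).countP (pvP n') : Int)
      = (acc.countP (pvP n') : Int) + (if pvP n' cur.reverse then 1 else 0)
        + pvScan n' cs cur.isEmpty := by
  induction cs with
  | nil =>
    intro cur acc
    simp only [PySem.Chars.split₀.go, pvScan]
    by_cases h : cur.isEmpty = true
    · have : cur = [] := List.isEmpty_iff.mp h
      subst this
      simp [pvP]
    · have hc : cur.isEmpty = false := by simpa using h
      simp only [hc, Bool.false_eq_true, if_false, List.countP_reverse, List.countP_cons]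
      by_cases hp : pvP n' cur.reverse = true <;> simp [hp]
  | cons c rest ih =>
    intro cur acc
    simp only [PySem.Chars.split₀.go]
    by_cases hs : PySem.Chars.isspace c = true
    · rw [if_pos hs]
      by_cases h : cur.isEmpty = true
      · have hc : cur = [] := List.isEmpty_iff.mp h
        subst hc
        simp only [List.isEmpty_nil, reduceIte]
        rw [ih [] acc]
        have hq : pvQ n' c = false := by simp [pvQ, hs]
        simp [pvScan, pvP, hq, hs]
      · have hc : cur.isEmpty = false := by simpa using h
        rw [if_neg (by simp [hc]), ih [] (cur.reverse :: acc)]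
        rw [List.countP_cons]
        simp [pvScan, pvP, hs, hc]
    · rw [if_neg hs, ih (c :: cur) acc]
      by_cases h : cur.isEmpty = true
      · have hc : cur = [] := List.isEmpty_iff.mp h
        subst hc
        simp only [List.reverse_cons, List.reverse_nil, List.nil_append, List.isEmpty_nil,
          List.isEmpty_cons, pvScan, hs]
        have : pvP n' [c] = pvQ n' c := by simp [pvP]
        rw [this]
        simp [pvP]
        by_cases hq : pvQ n' c = true
        · simp [hq]; ring
        · simp [hq]
      · have hcur : cur ≠ [] := fun hh => h (by simp [hh])
        have hne : cur.reverse ≠ [] := by simpa using hcur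
        have hhead : (cur.reverse ++ [c]).head? = cur.reverse.head? := by
          cases hcr : cur.reverse with
          | nil => exact absurd hcr hne
          | cons a t => simp
        have hP : pvP n' ((c :: cur).reverse) = pvP n' cur.reverse := by
          simp only [List.reverse_cons]; unfold pvP; rw [hhead]
        rw [hP]
        have hc : cur.isEmpty = false := by simpa using h
        simp [pvScan, hc, hs]

-- every word split₀ produces consists of non-space characters
theorem go_all_nospace (cs : List Char) : ∀ (cur : List Char) (acc : List (List Char)),
    cur.all (fun c => !PySem.Chars.isspace c) = true →
    (∀ w ∈ acc, w.all (fun c => !PySem.Chars.isspace c) = true) →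
    ∀ w ∈ PySem.Chars.split₀.go cs cur acc, w.all (fun c => !PySem.Chars.isspace c) = true := by
  induction cs with
  | nil =>
    intro cur acc hcur hacc w hw
    simp only [PySem.Chars.split₀.go] at hw
    split at hw
    · exact hacc w (List.mem_reverse.mp hw)
    · rcases List.mem_cons.mp (List.mem_reverse.mp hw) with h | h
      · subst h; simpa using hcur
      · exact hacc w h
  | cons c rest ih =>
    intro cur acc hcur hacc w hw
    simp only [PySem.Chars.split₀.go] at hw
    split at hw
    · split at hw
      · exact ih [] acc (by simp) hacc w hw
      · refine ih [] (cur.reverse :: acc) (by simp) ?_ w hw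
        intro v hv
        rcases List.mem_cons.mp hv with h | h
        · subst h; simpa using hcur
        · exact hacc v h
    · rename_i hs
      refine ih (c :: cur) acc ?_ hacc w hw
      simp only [List.all_cons, hcur, Bool.and_true]
      simpa using hs

-- A's word test equals pvP on every word split₀ produces
theorem countP_A_eq_P (n' : String) (t : List Char) :
    (PySem.Str.split₀ (String.ofList t)).countP
        (fun x => ((PySem.Str.pyGet? x 0).map fun c => String.ofList [c]) == some n')
      = (PySem.Chars.split₀ t).countP (pvP n') := by
  rw [PySem.Str.split₀]
  simp only [String.toList_ofList]
  rw [List.countP_map]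
  refine List.countP_congr ?_
  intro w hw
  have hsp := go_all_nospace t [] [] (by simp) (by simp) w hw
  simp only [Function.comp]
  have hget : PySem.Str.pyGet? (String.ofList w) 0 = w[0]? := by
    cases w <;> simp [PySem.Str.pyGet?, PySem.Chars.pyGet?, PySem.List.pyGet?, PySem.List.pyIdx?]
  rw [hget]
  cases w with
  | nil => simp [pvP]
  | cons a t' =>
    have ha : PySem.Chars.isspace a = false := by
      simp only [List.all_cons, Bool.and_eq_true] at hsp
      simpa using hsp.1
    simp [pvP, pvQ, ha]

-- when n' is not a single character, no one-character string equals it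
theorem pvP_false_of_len_ne_one (n' : String) (h : ¬ PySem.Str.len n' = 1) (w : List Char) :
    pvP n' w = false := by
  unfold pvP
  cases hw : w.head? with
  | none => rfl
  | some c =>
    unfold pvQ
    have : (String.ofList [c] == n') = false := by
      apply beq_eq_false_iff_ne.mpr
      intro he
      apply h
      rw [← he]
      simp [PySem.Str.len]
    simp [this]

-- ===== VERDICT (by name: the statement is the Claim_ definition above) =====
theorem funcion_conteo_caracter_n_spec : Claim_equal_funcion_conteo_caracter_n := by
  intro input_string n _
  unfold Spec_funcion_conteo_caracter_n funcion_conteo_caracter_n funcion_conteo_caracter_n_alt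
  set n' := PySem.Str.lower n with hn'
  set t := PySem.Chars.lower input_string.toList with ht
  have hlow : PySem.Str.lower input_string = String.ofList t := by
    rw [PySem.Str.lower]
  rw [hlow]
  have hA : (PySem.Str.split₀ (String.ofList t)).foldl
      (fun contador x =>
        if ((PySem.Str.pyGet? x 0).map fun c => String.ofList [c]) == some n' then contador + 1
        else contador) 0
      = ((PySem.Chars.split₀ t).countP (pvP n') : Int) := by
    have h1 := PySem.List.foldl_if_add_one
      (fun x => ((PySem.Str.pyGet? x 0).map fun c => String.ofList [c]) == some n')
      (PySem.Str.split₀ (String.ofList t)) 0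
    rw [← countP_A_eq_P n' t]
    simpa using h1
  rw [hA]
  by_cases hlen : PySem.Str.len n' = 1
  · rw [if_neg (by simp [PySem.Str.len] at hlen ⊢; omega)]
    simp only [String.toList_ofList]
    rw [pvScan_foldl n' t 0 true]
    have hgo := go_countP n' t [] []
    simp only [List.countP_nil, Nat.cast_zero, List.reverse_nil, List.isEmpty_nil] at hgo
    rw [PySem.Chars.split₀] at *
    rw [hgo]
    simp [pvP]
  · rw [if_pos (by simp [PySem.Str.len] at hlen ⊢; omega)]
    have hz : (PySem.Chars.split₀ t).countP (pvP n') = 0 := by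
      rw [List.countP_eq_zero]
      intro w _
      simp [pvP_false_of_len_ne_one n' hlen w]
    simp [hz]
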